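-- pv_equiv track=rewrite | github.com/homebrew9/hackerrank_solutions | algorithms/greedy/marcs_cakewalk.py | marcsCakewalk
-- ===== SOURCE A (Python) =====
-- def marcsCakewalk(calorie):
--     # Write your code here
--     calorie.sort(reverse=True)
--     res = 0
--     factor = 1
--     for c in calorie:
--         res += factor * c
--         factor *= 2
--     return res
-- ===== SOURCE B (Python) =====
-- def marcsCakewalk(calorie):
--     counts = {}
--     for c in calorie:
--         counts[c] = counts.get(c, 0) + 1
--     res = 0
--     p2 = 1
--     for v in sorted(counts, reverse=True):
--         k = counts[v]
--         res += v * (2 ** k - 1) * p2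
--         p2 *= 2 ** k
--     return res
-- ===== Notes on version B (the rewrite author's own statement) =====
-- stated objective: alternative
-- what changed: Instead of sorting the whole list and scanning it with a power-of-two factor, B builds a dict of value counts and sums one closed-form geometric block v*(2^(pos+k)-2^pos) per distinct value over the sorted distinct values; B does not mutate the argument (A sorts it in place).
import Mathlib
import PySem

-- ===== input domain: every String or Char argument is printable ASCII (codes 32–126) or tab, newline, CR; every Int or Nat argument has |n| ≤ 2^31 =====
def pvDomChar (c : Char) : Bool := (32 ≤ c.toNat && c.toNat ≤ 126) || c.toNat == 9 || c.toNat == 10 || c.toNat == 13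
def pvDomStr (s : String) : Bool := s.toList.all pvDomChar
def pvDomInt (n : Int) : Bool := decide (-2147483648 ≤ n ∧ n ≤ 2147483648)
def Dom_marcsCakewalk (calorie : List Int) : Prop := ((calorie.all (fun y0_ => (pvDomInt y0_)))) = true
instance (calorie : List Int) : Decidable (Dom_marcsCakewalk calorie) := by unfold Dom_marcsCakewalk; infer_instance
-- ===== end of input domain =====

-- B counts occurrences in a dict and sums each distinct value's geometric block
-- v * (2^(pos+k) - 2^pos) over the sorted distinct values (objective: alternative algorithm).
-- A sorts the argument in place; B does not mutate it — the equivalence proved is about the return value only.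

-- ===== PORT A =====
-- calorie.sort(reverse=True); res=0; factor=1; for c: res += factor*c; factor *= 2
def marcsCakewalk (calorie : List Int) : Int :=
  let s := PySem.List.sorted calorie (fun x => x) true
  (s.foldl (fun (p : Int × Int) c => (p.1 + p.2 * c, p.2 * 2)) (0, 1)).1

-- ===== PORT B =====
-- counts = {}; for c: counts[c] = counts.get(c,0)+1;
-- res=0; p2=1; for v in sorted(counts, reverse=True): k=counts[v]; res += v*(2**k-1)*p2; p2 *= 2**k
def marcsCakewalk_alt (calorie : List Int) : Int :=
  let counts := calorie.foldl (fun d c => d.insert c (d.getD c 0 + 1)) (PySem.Dict.empty : PySem.Dict Int Int)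
  let ks := PySem.List.sorted counts.keys (fun x => x) true
  (ks.foldl (fun (p : Int × Int) v =>
      let k := counts.getD v 0
      (p.1 + v * (2 ^ k.toNat - 1) * p.2, p.2 * 2 ^ k.toNat)) (0, 1)).1

-- ===== PRECONDITION & SPEC =====
def Spec_marcsCakewalk (calorie : List Int) (out : Int) : Prop := out = marcsCakewalk_alt calorie
instance (calorie : List Int) (out : Int) : Decidable (Spec_marcsCakewalk calorie out) := by unfold Spec_marcsCakewalk; infer_instance

-- ===== CLAIM (what is proved, stated in full; the proofs are below) =====
def Claim_equal_marcsCakewalk : Prop := ∀ (calorie : List Int), Dom_marcsCakewalk calorie → Spec_marcsCakewalk calorie (marcsCakewalk calorie)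

-- ===== LEMMAS AND PROOFS =====

-- Weighted sum Σ l[i] * 2^i, as a structural recursion.
def pvW : List Int → Int
  | [] => 0
  | c :: t => c + 2 * pvW t

-- A's paired fold from any (r, f) equals r + f * pvW l.
lemma pvA_fold (l : List Int) : ∀ r f : Int,
    (l.foldl (fun (p : Int × Int) c => (p.1 + p.2 * c, p.2 * 2)) (r, f)).1 = r + f * pvW l := by
  induction l with
  | nil => intro r f; simp [pvW]
  | cons c t ih => intro r f; simp only [List.foldl_cons]; rw [ih]; simp [pvW]; ring

-- pvW of a constant block followed by a tail.
lemma pvW_replicate (k : Nat) (v : Int) (rest : List Int) :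
    pvW (List.replicate k v ++ rest) = v * (2 ^ k - 1) + 2 ^ k * pvW rest := by
  induction k with
  | zero => simp
  | succ n ih => simp only [List.replicate_succ, List.cons_append, pvW, ih, pow_succ]; ring

-- B's fold over distinct values computes pvW of the grouped expansion.
lemma pvB_fold (cnt : Int → Nat) (ks : List Int) : ∀ (r f : Int),
    (ks.foldl (fun (q : Int × Int) v =>
        (q.1 + v * (2 ^ (cnt v) - 1) * q.2, q.2 * 2 ^ (cnt v))) (r, f)).1
    = r + f * pvW (ks.flatMap (fun v => List.replicate (cnt v) v)) := by
  induction ks with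
  | nil => intro r f; simp [pvW]
  | cons v t ih =>
    intro r f
    simp only [List.foldl_cons, List.flatMap_cons]
    rw [ih, pvW_replicate]
    ring

-- Count of any x in the grouped expansion of a nodup value list.
lemma pv_count_groups (ks xs : List Int) (hnd : ks.Nodup) (x : Int) :
    (ks.flatMap (fun v => List.replicate (xs.count v) v)).count x
      = if x ∈ ks then xs.count x else 0 := by
  induction ks with
  | nil => simp
  | cons v t ih =>
    simp only [List.flatMap_cons, List.count_append, List.count_replicate,
      ih (List.nodup_cons.mp hnd).2, List.mem_cons]
    by_cases hv : x = v
    · subst hv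
      have : x ∉ t := (List.nodup_cons.mp hnd).1
      simp [this]
    · simp [hv, Ne.symm hv]

-- The grouped expansion is descending when the value list is.
lemma pv_pairwise_groups (ks xs : List Int) (h : ks.Pairwise (fun a b => b ≤ a)) :
    (ks.flatMap (fun v => List.replicate (xs.count v) v)).Pairwise (fun a b => b ≤ a) := by
  induction ks with
  | nil => simp
  | cons v t ih =>
    rcases List.pairwise_cons.mp h with ⟨hv, ht⟩
    simp only [List.flatMap_cons]
    refine List.pairwise_append.mpr ⟨?_, ih ht, ?_⟩
    · exact List.pairwise_replicate.mpr (Or.inr le_rfl)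
    · intro a ha b hb
      rcases List.mem_flatMap.mp hb with ⟨w, hw, hbw⟩
      rw [List.eq_of_mem_replicate ha, List.eq_of_mem_replicate hbw]
      exact hv w hw

-- sorted(calorie, reverse=True) IS the grouped expansion over sorted distinct values.
lemma pv_sorted_eq_groups (calorie : List Int) :
    PySem.List.sorted calorie (fun x => x) true
      = (PySem.List.sorted (PySem.Set.ofList calorie) (fun x => x) true).flatMap
          (fun v => List.replicate (calorie.count v) v) := by
  set ks := PySem.List.sorted (PySem.Set.ofList calorie) (fun x => x) true with hks
  have hnd : ks.Nodup :=
    ((PySem.List.sorted_perm (PySem.Set.ofList calorie) (fun x => x) true).nodup_iff).mpr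
      (PySem.Set.nodup_ofList calorie)
  have hperm : (ks.flatMap (fun v => List.replicate (calorie.count v) v)).Perm calorie := by
    rw [List.perm_iff_count]
    intro x
    rw [pv_count_groups ks calorie hnd x]
    by_cases hx : x ∈ calorie
    · have : x ∈ ks := by
        rw [hks, PySem.List.mem_sorted]
        exact (PySem.Set.mem_ofList calorie x).mpr hx
      simp [this]
    · have : x ∉ ks := by
        rw [hks, PySem.List.mem_sorted]
        exact fun hc => hx ((PySem.Set.mem_ofList calorie x).mp hc)
      simp [this, List.count_eq_zero_of_not_mem hx]
  have h1 : (PySem.List.sorted calorie (fun x => x) true).Pairwise (fun a b => b ≤ a) :=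
    PySem.List.sorted_pairwise_rev calorie (fun x => x)
  have h2 : (ks.flatMap (fun v => List.replicate (calorie.count v) v)).Pairwise (fun a b => b ≤ a) :=
    pv_pairwise_groups ks calorie (PySem.List.sorted_pairwise_rev (PySem.Set.ofList calorie) (fun x => x))
  exact PySem.List.eq_of_perm_of_pairwise_le_of_injective (fun x => -x) neg_injective
    ((PySem.List.sorted_perm calorie (fun x => x) true).trans hperm.symm)
    (by simpa using h1) (by simpa using h2)

-- ===== VERDICT (by name: the statement is the Claim_ definition above) =====
theorem marcsCakewalk_spec : Claim_equal_marcsCakewalk := by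
  intro calorie _
  unfold Spec_marcsCakewalk marcsCakewalk marcsCakewalk_alt
  simp only [PySem.Dict.foldl_insert_getD_add_one_eq_counter, PySem.Dict.keys_counter,
    PySem.Dict.getD_counter]
  rw [pvA_fold]
  have hB := pvB_fold (fun v => calorie.count v)
    (PySem.List.sorted (PySem.Set.ofList calorie) (fun x => x) true) 0 1
  simp only [Int.toNat_natCast] at hB ⊢
  rw [hB, pv_sorted_eq_groups]
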